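-- pv_equiv track=rewrite | github.com/NauGht07/Krado | FinalKrado/main.py | subset_present
-- ===== SOURCE A (Python) =====
-- from itertools import combinations
--
-- def subset_present(positions, win_patterns):
--     n = len(positions)
--     for r in range(1, n + 1):
--         for subset in combinations(positions, r):
--             for pattern in win_patterns:
--                 if sorted(subset) == sorted(pattern):
--                     return True
--     return False
-- ===== SOURCE B (Python) =====
-- def subset_present(positions, win_patterns):
--     # multiset containment: a non-empty pattern wins iff every value occurs
--     # in positions at least as often as in the pattern
--     return any(
--         pattern and all(pattern.count(v) <= positions.count(v) for v in pattern)
--         for pattern in win_patterns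
--     )
-- ===== Notes on version B (the rewrite author's own statement) =====
-- stated objective: faster
-- what changed: Replaces the exponential enumeration of all subsets of positions (comparing each sorted subset against each sorted pattern) with a direct multiset-containment test: a non-empty pattern wins iff each of its values occurs in positions at least as often.
import Mathlib
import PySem

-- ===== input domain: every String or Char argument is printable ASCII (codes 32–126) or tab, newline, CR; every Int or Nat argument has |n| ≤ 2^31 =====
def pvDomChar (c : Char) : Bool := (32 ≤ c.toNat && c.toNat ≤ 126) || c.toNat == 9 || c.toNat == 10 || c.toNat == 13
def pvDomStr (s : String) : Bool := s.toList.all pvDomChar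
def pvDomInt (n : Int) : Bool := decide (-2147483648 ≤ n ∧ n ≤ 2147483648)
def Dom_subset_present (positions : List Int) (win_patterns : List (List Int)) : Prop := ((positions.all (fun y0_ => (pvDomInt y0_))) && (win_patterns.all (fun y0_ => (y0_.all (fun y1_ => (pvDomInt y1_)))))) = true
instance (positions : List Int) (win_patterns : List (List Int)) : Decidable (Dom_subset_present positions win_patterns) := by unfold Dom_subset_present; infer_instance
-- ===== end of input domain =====

-- B replaces A's exponential subset enumeration by a direct multiset-containment
-- test per pattern (objective: faster, asymptotically).

-- ===== PORT A =====
-- itertools.combinations(xs, r): all length-r subsequences of xs, in itertools order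
def pvCombos : Nat → List Int → List (List Int)
  | 0, _ => [[]]
  | _ + 1, [] => []
  | r + 1, x :: xs => (pvCombos r xs).map (x :: ·) ++ pvCombos (r + 1) xs

def subset_present (positions : List Int) (win_patterns : List (List Int)) : Bool :=
  (PySem.List.pyRange 1 ((positions.length : Int) + 1) 1).any (fun r =>
    (pvCombos r.toNat positions).any (fun subset =>
      win_patterns.any (fun pattern =>
        PySem.List.sorted subset (fun x => x) false == PySem.List.sorted pattern (fun x => x) false)))

-- ===== PORT B =====
def subset_present_alt (positions : List Int) (win_patterns : List (List Int)) : Bool :=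
  win_patterns.any (fun pattern =>
    (!pattern.isEmpty) &&
      pattern.all (fun v => decide (pattern.count v ≤ positions.count v)))

-- ===== PRECONDITION & SPEC =====
def Spec_subset_present (positions : List Int) (win_patterns : List (List Int)) (out : Bool) : Prop := out = subset_present_alt positions win_patterns
instance (positions : List Int) (win_patterns : List (List Int)) (out : Bool) : Decidable (Spec_subset_present positions win_patterns out) := by unfold Spec_subset_present; infer_instance

-- ===== CLAIM (what is proved, stated in full; the proofs are below) =====
def Claim_equal_subset_present : Prop := ∀ (positions : List Int) (win_patterns : List (List Int)), Dom_subset_present positions win_patterns → Spec_subset_present positions win_patterns (subset_present positions win_patterns)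

-- ===== LEMMAS AND PROOFS =====

-- membership in pvCombos = sublist of the right length
theorem mem_pvCombos {r : Nat} {xs s : List Int} :
    s ∈ pvCombos r xs ↔ s.Sublist xs ∧ s.length = r := by
  induction xs generalizing r s with
  | nil =>
    cases r with
    | zero => simp [pvCombos, List.sublist_nil]
    | succ r =>
      simp only [pvCombos, List.not_mem_nil, false_iff]
      rintro ⟨hs, hl⟩
      simp [List.sublist_nil] at hs
      simp [hs] at hl
  | cons x xs ih =>
    cases r with
    | zero =>
      constructor
      · rintro h; simp [pvCombos] at h; subst h; simp
      · rintro ⟨hs, hl⟩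
        rw [List.length_eq_zero_iff] at hl
        simp [pvCombos, hl]
    | succ r =>
      simp only [pvCombos, List.mem_append, List.mem_map]
      constructor
      · rintro (⟨t, ht, rfl⟩ | h)
        · obtain ⟨hs, hl⟩ := ih.mp ht
          exact ⟨List.Sublist.cons₂ x hs, by simp [hl]⟩
        · obtain ⟨hs, hl⟩ := ih.mp h
          exact ⟨hs.cons x, hl⟩
      · rintro ⟨hs, hl⟩
        cases hs with
        | cons _ hs' =>
          exact Or.inr (ih.mpr ⟨hs', hl⟩)
        | cons₂ _ hs' =>
          exact Or.inl ⟨_, ih.mpr ⟨hs', by simpa using hl⟩, rfl⟩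

-- A's truth value characterised: some pattern is a nonempty sub-multiset of positions
theorem subset_present_iff (positions : List Int) (win_patterns : List (List Int)) :
    subset_present positions win_patterns = true ↔
      ∃ p ∈ win_patterns, p ≠ [] ∧ p.Subperm positions := by
  simp only [subset_present, List.any_eq_true, PySem.List.mem_pyRange_one,
    beq_iff_eq, PySem.List.sorted_id_eq_sorted_id_iff_perm]
  constructor
  · rintro ⟨r, ⟨hr1, hr2⟩, s, hs, p, hp, hperm⟩
    obtain ⟨hsub, hlen⟩ := mem_pvCombos.mp hs
    refine ⟨p, hp, ?_, s, hperm, hsub⟩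
    intro hnil
    subst hnil
    have : s = [] := hperm.eq_nil
    subst this
    simp at hlen
    omega
  · rintro ⟨p, hp, hne, s, hsp, hsub⟩
    have hlen : 1 ≤ s.length := by
      rcases s with _ | ⟨a, t⟩
      · exact absurd hsp.symm.eq_nil hne
      · simp
    refine ⟨(s.length : Int), ⟨by exact_mod_cast hlen, ?_⟩,
      s, mem_pvCombos.mpr ⟨hsub, by simp⟩, p, hp, hsp⟩
    have := hsub.length_le
    omega

-- B's truth value characterised the same way
theorem subset_present_alt_iff (positions : List Int) (win_patterns : List (List Int)) :
    subset_present_alt positions win_patterns = true ↔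
      ∃ p ∈ win_patterns, p ≠ [] ∧ p.Subperm positions := by
  simp only [subset_present_alt, List.any_eq_true, Bool.and_eq_true, Bool.not_eq_eq_eq_not,
    Bool.not_true, List.isEmpty_eq_false_iff, List.all_eq_true, decide_eq_true_eq,
    ne_eq, List.isEmpty_iff]
  refine exists_congr fun p => and_congr_right fun _ => and_congr_right fun _ => ?_
  exact (List.subperm_ext_iff).symm

-- ===== VERDICT (by name: the statement is the Claim_ definition above) =====
theorem subset_present_spec : Claim_equal_subset_present := by
  intro positions win_patterns _
  unfold Spec_subset_present
  rcases h : subset_present_alt positions win_patterns with _ | _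
  · rw [← Bool.not_eq_true] at h ⊢
    rw [subset_present_iff]
    rw [subset_present_alt_iff] at h
    exact h
  · rw [subset_present_iff, ← subset_present_alt_iff]
    exact h
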